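-- pv_equiv track=rewrite | github.com/skidne/labs_MS | lab5/ex3_rating.py | find_min_dist
-- ===== SOURCE A (Python) =====
-- def find_min_dist(dist, queue):
--     min_index = -1
--     min_elem = float("Inf")
--
--     for ind in range(len(dist)):
--         if dist[ind] < min_elem and ind in queue:
--             min_index = ind
--             min_elem = dist[ind]
--     return min_index
-- ===== SOURCE B (Python) =====
-- def find_min_dist(dist, queue):
--     best = None
--     for i in queue:
--         if 0 <= i < len(dist):
--             key = (dist[i], i)
--             if best is None or key < best:
--                 best = key
--     return -1 if best is None else best[1]
-- ===== Notes on version B (the rewrite author's own statement) =====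
-- stated objective: faster
-- what changed: B iterates over the queue's elements as candidate indices (filtering 0 <= i < len(dist)) and keeps the lexicographic minimum (dist[i], i), replacing A's scan over every index of dist with a per-index queue-membership test.
import Mathlib
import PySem

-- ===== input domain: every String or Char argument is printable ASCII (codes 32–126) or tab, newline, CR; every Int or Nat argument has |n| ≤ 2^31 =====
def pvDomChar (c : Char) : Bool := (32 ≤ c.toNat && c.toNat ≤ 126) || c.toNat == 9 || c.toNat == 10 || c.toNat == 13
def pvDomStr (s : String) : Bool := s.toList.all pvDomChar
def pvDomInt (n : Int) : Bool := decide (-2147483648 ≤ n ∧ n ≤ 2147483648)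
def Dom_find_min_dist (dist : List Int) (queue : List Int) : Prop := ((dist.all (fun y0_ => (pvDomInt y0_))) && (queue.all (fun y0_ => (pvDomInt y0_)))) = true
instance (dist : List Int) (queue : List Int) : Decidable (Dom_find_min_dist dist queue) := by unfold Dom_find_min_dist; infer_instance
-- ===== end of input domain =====

-- B is a structurally different re-implementation: it scans the queue's elements as candidate
-- indices and keeps the lexicographic minimum (dist[i], i), instead of A's scan of every index
-- of dist with a membership test; objective: faster (O(len(queue)) vs A's O(len(dist)*len(queue)), measured).

-- ===== PORT A =====
-- state: (min_index, min_elem) with `none` playing float("Inf")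
def astep (dist : List Int) (queue : List Int) (s : Int × Option Int) (ind : Int) : Int × Option Int :=
  if ((match s.2 with
       | none => true
       | some m => decide (PySem.List.pyGetD dist ind 0 < m)) && queue.contains ind) then
    (ind, some (PySem.List.pyGetD dist ind 0))
  else s

def find_min_dist (dist : List Int) (queue : List Int) : Int :=
  ((PySem.List.pyRange 0 (dist.length : Int) 1).foldl (astep dist queue) (-1, none)).1

-- ===== PORT B =====
-- Python tuple comparison `key < best` on pairs of ints
def pltB (a b : Int × Int) : Bool := decide (a.1 < b.1) || (a.1 == b.1 && decide (a.2 < b.2))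

def bstep (dist : List Int) (b : Option (Int × Int)) (i : Int) : Option (Int × Int) :=
  if 0 ≤ i ∧ i < (dist.length : Int) then
    let key := (PySem.List.pyGetD dist i 0, i)
    match b with
    | none => some key
    | some m => if pltB key m then some key else some m
  else b

def find_min_dist_alt (dist : List Int) (queue : List Int) : Int :=
  match queue.foldl (bstep dist) none with
  | none => -1
  | some m => m.2

-- ===== PRECONDITION & SPEC =====
def Spec_find_min_dist (dist : List Int) (queue : List Int) (out : Int) : Prop := out = find_min_dist_alt dist queue
instance (dist : List Int) (queue : List Int) (out : Int) : Decidable (Spec_find_min_dist dist queue out) := by unfold Spec_find_min_dist; infer_instance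

-- ===== CLAIM (what is proved, stated in full; the proofs are below) =====
def Claim_equal_find_min_dist : Prop := ∀ (dist : List Int) (queue : List Int), Dom_find_min_dist dist queue → Spec_find_min_dist dist queue (find_min_dist dist queue)

-- ===== LEMMAS AND PROOFS =====

def keyOf (dist : List Int) (i : Int) : Int × Int := (PySem.List.pyGetD dist i 0, i)

def inR (dist : List Int) (i : Int) : Prop := 0 ≤ i ∧ i < (dist.length : Int)

-- order facts about pltB
lemma pltB_irrefl (a : Int × Int) : pltB a a = false := by
  simp [pltB]

lemma pltB_asymm_eq {a b : Int × Int} (h1 : pltB a b = false) (h2 : pltB b a = false) : a = b := by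
  simp [pltB] at h1 h2
  obtain ⟨a1, a2⟩ := a; obtain ⟨b1, b2⟩ := b
  simp_all
  omega

lemma pltB_le_trans {a b c : Int × Int} (h1 : pltB b a = false) (h2 : pltB c b = false) :
    pltB c a = false := by
  simp [pltB] at *
  obtain ⟨a1, a2⟩ := a; obtain ⟨b1, b2⟩ := b; obtain ⟨c1, c2⟩ := c
  simp_all
  omega

-- ===== B-side fold characterization =====
lemma bfold_none (dist : List Int) :
    ∀ (l : List Int) (b : Option (Int × Int)),
      l.foldl (bstep dist) b = none ↔ b = none ∧ ∀ i ∈ l, ¬ inR dist i := by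
  intro l
  induction l with
  | nil => intro b; simp
  | cons x t ih =>
    intro b
    simp only [List.foldl_cons, ih, bstep]
    constructor
    · rintro ⟨h1, h2⟩
      split at h1
      · cases b with
        | none => simp_all
        | some v =>
          simp_all
          split at h1 <;> simp_all
      · rename_i hx
        refine ⟨h1, ?_⟩
        intro i hi
        rw [List.mem_cons] at hi
        rcases hi with hi | hi
        · subst hi; exact fun h => hx ⟨h.1, h.2⟩
        · exact h2 i hi
    · rintro ⟨hb, hall⟩
      have hx : ¬ inR dist x := hall x (by simp)
      rw [if_neg (by exact fun h => hx ⟨h.1, h.2⟩)]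
      exact ⟨hb, fun i hi => hall i (by simp [hi])⟩

lemma bfold_some (dist : List Int) :
    ∀ (l : List Int) (b : Option (Int × Int)) (m : Int × Int),
      l.foldl (bstep dist) b = some m →
      (b = some m ∨ ∃ i ∈ l, inR dist i ∧ m = keyOf dist i) ∧
      (∀ i ∈ l, inR dist i → pltB (keyOf dist i) m = false) ∧
      (∀ m0, b = some m0 → pltB m0 m = false) := by
  intro l
  induction l with
  | nil =>
    intro b m h
    simp at h
    subst h
    exact ⟨Or.inl rfl, by simp, fun m0 h0 => by cases h0; exact pltB_irrefl m⟩
  | cons x t ih =>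
    intro b m h
    simp only [List.foldl_cons] at h
    obtain ⟨hmem, hmin, hmono⟩ := ih (bstep dist b x) m h
    by_cases hx : inR dist x
    · -- bstep takes the candidate branch
      have hxr : (0 ≤ x ∧ x < (dist.length : Int)) := ⟨hx.1, hx.2⟩
      -- key fact: the new accumulator is ≤ key x, and old acc ≤-preserved
      have hstep_le_key : pltB (keyOf dist x) m = false := by
        -- the acc after bstep is ≤ keyOf x; m ≤ that acc by hmono
        have : ∀ m1, bstep dist b x = some m1 → pltB (keyOf dist x) m1 = false := by
          intro m1 h1
          simp only [bstep, if_pos hxr] at h1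
          cases b with
          | none => simp at h1; subst h1; exact pltB_irrefl _
          | some mb =>
            simp only at h1
            split at h1
            · cases h1; exact pltB_irrefl _
            · cases h1; rename_i hlt; simpa using hlt
        -- bstep with inR never returns none
        cases h1 : bstep dist b x with
        | none =>
          simp only [bstep, if_pos hxr] at h1
          cases b <;> simp at h1
          split at h1 <;> simp_all
        | some m1 =>
          exact pltB_le_trans (hmono m1 h1) (this m1 h1)
      refine ⟨?_, ?_, ?_⟩
      · rcases hmem with hmem | ⟨i, hi, hiR, hk⟩
        · -- m came through bstep on b
          simp only [bstep, if_pos hxr] at hmem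
          cases b with
          | none => simp at hmem; exact Or.inr ⟨x, by simp, hx, hmem.symm⟩
          | some mb =>
            simp only at hmem
            split at hmem
            · cases hmem; exact Or.inr ⟨x, by simp, hx, rfl⟩
            · cases hmem; exact Or.inl rfl
        · exact Or.inr ⟨i, by simp [hi], hiR, hk⟩
      · intro i hi hiR
        rw [List.mem_cons] at hi
        rcases hi with hi | hi
        · subst hi; exact hstep_le_key
        · exact hmin i hi hiR
      · intro m0 h0
        subst h0
        simp only [bstep, if_pos hxr] at hmono
        split at hmono
        · rename_i hlt
          have h1 : pltB (PySem.List.pyGetD dist x 0, x) m = false := hmono _ rfl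
          by_contra hc
          rw [Bool.not_eq_false] at hc
          simp [pltB] at h1 hc hlt
          omega
        · exact hmono _ rfl
    · -- x skipped
      have hb : bstep dist b x = b := by
        simp only [bstep]
        rw [if_neg (fun h => hx ⟨h.1, h.2⟩)]
      rw [hb] at hmem hmono
      refine ⟨?_, ?_, hmono⟩
      · rcases hmem with hmem | ⟨i, hi, hiR, hk⟩
        · exact Or.inl hmem
        · exact Or.inr ⟨i, by simp [hi], hiR, hk⟩
      · intro i hi hiR
        rw [List.mem_cons] at hi
        rcases hi with hi | hi
        · subst hi; exact absurd hiR hx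
        · exact hmin i hi hiR

-- ===== A-side loop invariant =====
def AInv (dist queue : List Int) (k : Int) (s : Int × Option Int) : Prop :=
  (s = (-1, none) ∧ ∀ i : Int, 0 ≤ i → i < k → i ∉ queue) ∨
  (∃ j : Int, s = (j, some (PySem.List.pyGetD dist j 0)) ∧ 0 ≤ j ∧ j < k ∧ j ∈ queue ∧
    ∀ i : Int, 0 ≤ i → i < k → i ∈ queue → pltB (keyOf dist i) (keyOf dist j) = false)

lemma afold_inv (dist queue : List Int) :
    ∀ (k : Nat),
      AInv dist queue (k : Int)
        ((PySem.List.pyRange 0 (k : Int) 1).foldl (astep dist queue) (-1, none)) := by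
  intro k
  induction k with
  | zero =>
    simp [AInv]
    intro i h1 h2; omega
  | succ k ih =>
    have hsplit : PySem.List.pyRange 0 ((k : Int) + 1) 1
        = PySem.List.pyRange 0 (k : Int) 1 ++ [(k : Int)] :=
      PySem.List.pyRange_one_succ_right (by positivity)
    push_cast
    rw [hsplit, List.foldl_append]
    set s := (PySem.List.pyRange 0 (k : Int) 1).foldl (astep dist queue) (-1, none) with hs
    simp only [List.foldl_cons, List.foldl_nil]
    rcases ih with ⟨hse, hnone⟩ | ⟨j, hsj, hj0, hjk, hjq, hjmin⟩
    · rw [hse]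
      simp only [astep]
      by_cases hk : (k : Int) ∈ queue
      · rw [if_pos (by simp [hk])]
        refine Or.inr ⟨(k : Int), rfl, by positivity, by omega, hk, ?_⟩
        intro i h0 h1 hq
        have : i = (k : Int) := by
          by_contra hne
          exact hnone i h0 (by omega) hq
        subst this
        exact pltB_irrefl _
      · rw [if_neg (by simp [hk])]
        refine Or.inl ⟨rfl, ?_⟩
        intro i h0 h1 hq
        by_cases hik : i = (k : Int)
        · exact hk (hik ▸ hq)
        · exact hnone i h0 (by omega) hq
    · rw [hsj]
      simp only [astep]
      by_cases hk : (k : Int) ∈ queue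
      · by_cases hlt : PySem.List.pyGetD dist (k : Int) 0 < PySem.List.pyGetD dist j 0
        all_goals simp [PySem.List.pyGetD_natCast] at hlt
        · rw [if_pos (by simp [hk, hlt])]
          refine Or.inr ⟨(k : Int), rfl, by positivity, by omega, hk, ?_⟩
          intro i h0 h1 hq
          by_cases hik : i = (k : Int)
          · subst hik; exact pltB_irrefl _
          · have hi := hjmin i h0 (by omega) hq
            simp [pltB, keyOf] at hi ⊢
            omega
        · rw [if_neg (by simp [hlt])]
          refine Or.inr ⟨j, rfl, hj0, by omega, hjq, ?_⟩
          intro i h0 h1 hq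
          by_cases hik : i = (k : Int)
          · subst hik
            simp [pltB, keyOf]
            omega
          · exact hjmin i h0 (by omega) hq
      · rw [if_neg (by simp [hk])]
        refine Or.inr ⟨j, rfl, hj0, by omega, hjq, ?_⟩
        intro i h0 h1 hq
        by_cases hik : i = (k : Int)
        · subst hik; exact absurd hq hk
        · exact hjmin i h0 (by omega) hq

-- ===== VERDICT (by name: the statement is the Claim_ definition above) =====
theorem find_min_dist_spec : Claim_equal_find_min_dist := by
  intro dist queue _
  unfold Spec_find_min_dist find_min_dist find_min_dist_alt
  have hinv := afold_inv dist queue dist.length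
  set sA := (PySem.List.pyRange 0 (dist.length : Int) 1).foldl (astep dist queue) (-1, none) with hsA
  rcases hinv with ⟨hse, hnone⟩ | ⟨j, hsj, hj0, hjn, hjq, hjmin⟩
  · -- no candidates: B's fold is none
    have : queue.foldl (bstep dist) none = none := by
      rw [bfold_none]
      exact ⟨rfl, fun i hi hR => hnone i hR.1 hR.2 hi⟩
    rw [this, hse]
  · -- A found j; B must find the same index
    cases hB : queue.foldl (bstep dist) none with
    | none =>
      rw [bfold_none] at hB
      exact absurd ⟨hj0, hjn⟩ (hB.2 j hjq)
    | some m =>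
      obtain ⟨hmem, hmin, _⟩ := bfold_some dist queue none m hB
      rcases hmem with hmem | ⟨i, hiq, hiR, hk⟩
      · simp at hmem
      · subst hk
        have h1 : pltB (keyOf dist i) (keyOf dist j) = false := hjmin i hiR.1 hiR.2 hiq
        have h2 : pltB (keyOf dist j) (keyOf dist i) = false := hmin j hjq ⟨hj0, hjn⟩
        have := pltB_asymm_eq h1 h2
        have hij : i = j := congrArg Prod.snd this
        rw [hsj]
        simp [keyOf, hij]
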